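-- pv_equiv track=rewrite | github.com/medthehatta/meve | purchase_tour.py | orders_by_location
-- ===== SOURCE A (Python) =====
-- def orders_by_location(market_entries):
--     orders = {}
--
--     for entry in market_entries:
--         what = entry["type_id"]
--         where = entry["location_id"]
--
--         if where not in orders:
--             orders[where] = {what: [entry]}
--         elif what not in orders[where]:
--             orders[where][what] = [entry]
--         else:
--             orders[where][what].append(entry)
--
--     return orders
-- ===== SOURCE B (Python) =====
-- def orders_by_location(market_entries):
--     # Two-phase group-by: first bucket entries per location, then group each
--     # bucket by type; dict insertion order (first location / first type) and
--     # entry order are preserved exactly as in the fused one-pass version.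
--     by_loc = {}
--     for entry in market_entries:
--         by_loc.setdefault(entry["location_id"], []).append(entry)
--
--     def group_by_type(bucket):
--         inner = {}
--         for entry in bucket:
--             inner.setdefault(entry["type_id"], []).append(entry)
--         return inner
--
--     return {location: group_by_type(bucket) for location, bucket in by_loc.items()}
-- ===== Notes on version B (the rewrite author's own statement) =====
-- stated objective: alternative
-- what changed: Replaces the single fused loop with three-way nested-dict branching by a two-phase group-by: one pass buckets entries per location via setdefault, then each bucket is independently grouped by type and the result assembled with a dict comprehension.
import Mathlib
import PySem

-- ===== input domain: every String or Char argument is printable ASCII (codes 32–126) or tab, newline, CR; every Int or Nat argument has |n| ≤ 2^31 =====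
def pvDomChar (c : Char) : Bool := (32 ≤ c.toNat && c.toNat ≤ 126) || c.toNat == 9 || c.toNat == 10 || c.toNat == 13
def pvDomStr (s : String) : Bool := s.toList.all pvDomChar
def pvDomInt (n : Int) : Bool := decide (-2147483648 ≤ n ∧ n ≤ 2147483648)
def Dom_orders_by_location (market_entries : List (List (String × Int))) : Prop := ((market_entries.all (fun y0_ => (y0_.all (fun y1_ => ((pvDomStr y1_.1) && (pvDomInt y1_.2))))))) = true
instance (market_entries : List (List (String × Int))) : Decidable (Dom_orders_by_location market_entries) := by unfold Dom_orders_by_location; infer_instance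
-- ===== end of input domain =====

-- B replaces A's fused one-pass nested-dict insert by a two-phase group-by
-- (bucket entries per location, then group each bucket by type); same return value.


-- ===== PORT A =====
-- entry[k]: first-match association-list lookup; the default 0 is unreachable
-- under Pre_ (every entry carries both keys).
def pvGetKey (e : List (String × Int)) (k : String) : Int :=
  ((PySem.Dict.mk e).get? k).getD 0

def orders_by_location (market_entries : List (List (String × Int))) : List (Int × List (Int × List (List (String × Int)))) :=
  let orders : PySem.Dict Int (PySem.Dict Int (List (List (String × Int)))) :=
    market_entries.foldl (fun orders entry =>
      let what := pvGetKey entry "type_id"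
      let wher := pvGetKey entry "location_id"
      if orders.contains wher = false then
        orders.insert wher (PySem.Dict.empty.insert what [entry])
      else if (orders.getD wher PySem.Dict.empty).contains what = false then
        orders.modify wher PySem.Dict.empty (fun inner => inner.insert what [entry])
      else
        orders.modify wher PySem.Dict.empty (fun inner => inner.modify what [] (fun l => l ++ [entry]))
      ) PySem.Dict.empty
  orders.items.map (fun p => (p.1, p.2.items))

-- ===== PORT B =====
-- by_loc.setdefault(key, []).append(entry)  ≡  by_loc[key] = by_loc.get(key, []) + [entry]  ≡  Dict.modify key [] (· ++ [entry])
def pvGroupByType (bucket : List (List (String × Int))) : PySem.Dict Int (List (List (String × Int))) :=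
  bucket.foldl (fun inner entry => inner.modify (pvGetKey entry "type_id") [] (fun l => l ++ [entry])) PySem.Dict.empty

def orders_by_location_alt (market_entries : List (List (String × Int))) : List (Int × List (Int × List (List (String × Int)))) :=
  let by_loc : PySem.Dict Int (List (List (String × Int))) :=
    market_entries.foldl (fun d entry => d.modify (pvGetKey entry "location_id") [] (fun l => l ++ [entry])) PySem.Dict.empty
  by_loc.items.map (fun p => (p.1, (pvGroupByType p.2).items))

-- ===== PRECONDITION & SPEC =====
-- Pre_ excludes exactly the inputs on which Python A raises KeyError: an entry
-- dict lacking the key "type_id" or "location_id" (B raises there too).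
def Pre_orders_by_location (market_entries : List (List (String × Int))) : Prop :=
  ∀ e ∈ market_entries, "type_id" ∈ e.map Prod.fst ∧ "location_id" ∈ e.map Prod.fst
instance (market_entries : List (List (String × Int))) : Decidable (Pre_orders_by_location market_entries) := by unfold Pre_orders_by_location; infer_instance

def pvWitness_orders_by_location : (List (List (String × Int))) :=
  [[("type_id", 1), ("location_id", 2)], [("type_id", 1), ("location_id", 2), ("volume", 5)]]

def Spec_orders_by_location (market_entries : List (List (String × Int))) (out : List (Int × List (Int × List (List (String × Int))))) : Prop := out = orders_by_location_alt market_entries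
instance (market_entries : List (List (String × Int))) (out : List (Int × List (Int × List (List (String × Int))))) : Decidable (Spec_orders_by_location market_entries out) := by
  unfold Spec_orders_by_location
  letI h1 : DecidableEq (List (Int × List (List (String × Int)))) := inferInstance
  letI h2 : DecidableEq (Int × List (Int × List (List (String × Int)))) := inferInstance
  infer_instance

-- ===== CLAIM (what is proved, stated in full; the proofs are below) =====
def Claim_equal_orders_by_location : Prop := ∀ (market_entries : List (List (String × Int))), Dom_orders_by_location market_entries → Pre_orders_by_location market_entries → Spec_orders_by_location market_entries (orders_by_location market_entries)

-- ===== LEMMAS AND PROOFS =====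

-- A's loop body, named (let-free, definitionally equal to the port's lambda).
def pvStepA (orders : PySem.Dict Int (PySem.Dict Int (List (List (String × Int))))) (entry : List (String × Int)) : PySem.Dict Int (PySem.Dict Int (List (List (String × Int)))) :=
  if orders.contains (pvGetKey entry "location_id") = false then
    orders.insert (pvGetKey entry "location_id") (PySem.Dict.empty.insert (pvGetKey entry "type_id") [entry])
  else if (orders.getD (pvGetKey entry "location_id") PySem.Dict.empty).contains (pvGetKey entry "type_id") = false then
    orders.modify (pvGetKey entry "location_id") PySem.Dict.empty (fun inner => inner.insert (pvGetKey entry "type_id") [entry])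
  else
    orders.modify (pvGetKey entry "location_id") PySem.Dict.empty (fun inner => inner.modify (pvGetKey entry "type_id") [] (fun l => l ++ [entry]))

-- B's location-bucketing step, named.
def pvStepL (d : PySem.Dict Int (List (List (String × Int)))) (entry : List (String × Int)) : PySem.Dict Int (List (List (String × Int))) :=
  d.modify (pvGetKey entry "location_id") [] (fun l => l ++ [entry])

-- The simulation map: a location-buckets dict with each bucket grouped by type.
def pvLift (d : PySem.Dict Int (List (List (String × Int)))) : PySem.Dict Int (PySem.Dict Int (List (List (String × Int)))) :=
  PySem.Dict.mk (d.items.map (fun p => (p.1, pvGroupByType p.2)))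

lemma pvGroupByType_append (b : List (List (String × Int))) (e : List (String × Int)) :
    pvGroupByType (b ++ [e]) = (pvGroupByType b).modify (pvGetKey e "type_id") [] (fun l => l ++ [e]) := by
  simp [pvGroupByType, List.foldl_append]

lemma pvLift_contains (d : PySem.Dict Int (List (List (String × Int)))) (k : Int) :
    (pvLift d).contains k = d.contains k := by
  simp [pvLift, PySem.Dict.contains, List.any_map, Function.comp_def]

lemma pvLift_get? (d : PySem.Dict Int (List (List (String × Int)))) (k : Int) :
    (pvLift d).get? k = (d.get? k).map pvGroupByType := by
  simp only [pvLift, PySem.Dict.get?]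
  induction d.items with
  | nil => rfl
  | cons p rest ih =>
      by_cases h : p.1 == k
      · simp [List.find?, h]
      · simpa [List.find?, h] using ih

-- Inserting a grouped bucket commutes with pvLift.
lemma pvLift_insert (d : PySem.Dict Int (List (List (String × Int)))) (k : Int) (v : List (List (String × Int))) :
    (pvLift d).insert k (pvGroupByType v) = pvLift (d.insert k v) := by
  apply PySem.Dict.ext
  by_cases h : d.contains k
  · have h' : (pvLift d).contains k = true := by rw [pvLift_contains]; exact h
    rw [PySem.Dict.items_insert_of_contains _ _ h']
    have : (pvLift (d.insert k v)).items = (d.insert k v).items.map (fun p => (p.1, pvGroupByType p.2)) := rfl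
    rw [this, PySem.Dict.items_insert_of_contains _ _ h]
    have : (pvLift d).items = d.items.map (fun p => (p.1, pvGroupByType p.2)) := rfl
    rw [this]
    simp only [List.map_map]
    apply List.map_congr_left
    intro p _
    by_cases hp : p.1 = k <;> simp [hp]
  · have h' : (pvLift d).contains k = false := by rw [pvLift_contains]; simpa using h
    rw [PySem.Dict.items_insert_of_not_contains _ _ h']
    have hrhs : (pvLift (d.insert k v)).items = (d.insert k v).items.map (fun p => (p.1, pvGroupByType p.2)) := rfl
    rw [hrhs, PySem.Dict.items_insert_of_not_contains _ _ (by simpa using h)]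
    simp [pvLift]

-- One fused step of A simulates one bucketing step of B through pvLift.
lemma pvStepA_lift (d : PySem.Dict Int (List (List (String × Int)))) (e : List (String × Int)) :
    pvStepA (pvLift d) e = pvLift (pvStepL d e) := by
  simp only [pvStepA, pvStepL]
  set t := pvGetKey e "type_id" with ht
  set w := pvGetKey e "location_id" with hw
  by_cases hc : d.contains w
  · -- location already present: A updates the inner dict, B appends to the bucket
    obtain ⟨b, hb⟩ : ∃ b, d.get? w = some b := by
      rcases h : d.get? w with _ | b
      · exfalso
        have := PySem.Dict.contains_eq_isSome_get? (d := d) (k := w)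
        rw [h] at this; simp [this] at hc
      · exact ⟨b, rfl⟩
    have hgd : d.getD w [] = b := by simp [PySem.Dict.getD, hb]
    have hcl : (pvLift d).contains w = true := by rw [pvLift_contains]; exact hc
    have hgl : (pvLift d).getD w PySem.Dict.empty = pvGroupByType b := by
      simp [PySem.Dict.getD, pvLift_get?, hb]
    have hmod : PySem.Dict.modify d w [] (fun l => l ++ [e]) = d.insert w (b ++ [e]) := by
      rw [PySem.Dict.modify, hgd]
    rw [hmod, ← pvLift_insert, pvGroupByType_append, ← ht]
    by_cases hti : (pvGroupByType b).contains t
    · simp [hcl, hgl, hti, PySem.Dict.modify]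
    · have hget : (pvGroupByType b).getD t [] = [] :=
        PySem.Dict.getD_of_not_contains _ _ (by simpa using hti)
      simp [hcl, hgl, hti, PySem.Dict.modify, hget]
  · -- new location: A inserts a fresh singleton inner dict, B a fresh bucket
    have hcl : (pvLift d).contains w = false := by rw [pvLift_contains]; simpa using hc
    have hgd : d.getD w [] = [] := PySem.Dict.getD_of_not_contains _ _ (by simpa using hc)
    have hmod : PySem.Dict.modify d w [] (fun l => l ++ [e]) = d.insert w [e] := by
      simp [PySem.Dict.modify, hgd]
    have hsingle : (PySem.Dict.empty : PySem.Dict Int (List (List (String × Int)))).insert t [e] = pvGroupByType [e] := by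
      simp [pvGroupByType, PySem.Dict.modify, ← ht]
    rw [hmod, ← pvLift_insert]
    simp [hcl, hsingle]

lemma pvFoldl_lift (es : List (List (String × Int))) (d : PySem.Dict Int (List (List (String × Int)))) :
    es.foldl pvStepA (pvLift d) = pvLift (es.foldl pvStepL d) := by
  induction es generalizing d with
  | nil => rfl
  | cons e es ih => rw [List.foldl_cons, List.foldl_cons, pvStepA_lift, ih]

-- ===== VERDICT (by name: the statement is the Claim_ definition above) =====
theorem orders_by_location_spec : Claim_equal_orders_by_location := by
  intro mes _ _
  show _ = _
  unfold orders_by_location orders_by_location_alt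
  have h0 : (PySem.Dict.empty : PySem.Dict Int (PySem.Dict Int (List (List (String × Int))))) = pvLift PySem.Dict.empty := rfl
  have hA : mes.foldl (fun orders entry =>
      let what := pvGetKey entry "type_id"
      let wher := pvGetKey entry "location_id"
      if orders.contains wher = false then
        orders.insert wher (PySem.Dict.empty.insert what [entry])
      else if (orders.getD wher PySem.Dict.empty).contains what = false then
        orders.modify wher PySem.Dict.empty (fun inner => inner.insert what [entry])
      else
        orders.modify wher PySem.Dict.empty (fun inner => inner.modify what [] (fun l => l ++ [entry])))
      PySem.Dict.empty = pvLift (mes.foldl pvStepL PySem.Dict.empty) := by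
    rw [h0, ← pvFoldl_lift]; rfl
  rw [hA]
  simp only [pvLift, List.map_map, Function.comp_def]
  rfl
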